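-- pv_equiv track=rewrite | github.com/sauravbhattacharya001/sauravcode | sauravobf.py | obfuscate_source
-- ===== SOURCE A (Python) =====
-- def obfuscate_line(line, rename_map, strip_comments=False):
--     if not line.strip():
--         return line
--     stripped = line.lstrip()
--     if stripped.startswith('#'):
--         return None if strip_comments else line
--
--     result = []
--     i = 0
--     text = line
--     while i < len(text):
--         if text[i] == '"':
--             if i > 0 and text[i-1] == 'f' and (i < 2 or not text[i-2].isalnum()):
--                 j = i + 1
--                 while j < len(text):
--                     if text[j] == '\\': j += 2; continue
--                     if text[j] == '"': j += 1; break
--                     j += 1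
--                 result.append(text[i:j]); i = j; continue
--             else:
--                 j = i + 1
--                 while j < len(text):
--                     if text[j] == '\\': j += 2; continue
--                     if text[j] == '"': j += 1; break
--                     j += 1
--                 result.append(text[i:j]); i = j; continue
--         if text[i] == '#':
--             if strip_comments: break
--             result.append(text[i:]); break
--         if text[i].isalpha() or text[i] == '_':
--             j = i
--             while j < len(text) and (text[j].isalnum() or text[j] == '_'):
--                 j += 1
--             word = text[i:j]
--             result.append(rename_map.get(word, word))
--             i = j; continue
--         result.append(text[i]); i += 1
--     return ''.join(result)
--
-- def obfuscate_source(source, rename_map, strip_comments=False):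
--     lines = source.split('\n')
--     output = [r for line in lines if (r := obfuscate_line(line, rename_map, strip_comments)) is not None]
--     if strip_comments:
--         cleaned, prev_blank = [], False
--         for line in output:
--             is_blank = not line.strip()
--             if is_blank and prev_blank: continue
--             cleaned.append(line); prev_blank = is_blank
--         output = cleaned
--     return '\n'.join(output)
-- ===== SOURCE B (Python) =====
-- import re
--
-- # One token regex, alternatives in priority order: double-quoted string
-- # (tolerating a lone trailing backslash and an unterminated tail, exactly like
-- # the manual scanner), '#'-to-end comment, identifier.
-- _TOKEN = re.compile(r'"(?:\\.|[^"\\])*\\?"?|#.*|[A-Za-z_][A-Za-z0-9_]*')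
--
--
-- def obfuscate_source(source, rename_map, strip_comments=False):
--     def sub_line(line):
--         if not line.strip():
--             return line
--         if line.lstrip().startswith('#'):
--             return None if strip_comments else line
--
--         def repl(m):
--             t = m.group(0)
--             if t.startswith('"'):
--                 return t
--             if t.startswith('#'):
--                 return '' if strip_comments else t
--             return rename_map.get(t, t)
--
--         return _TOKEN.sub(repl, line)
--
--     output = [r for r in map(sub_line, source.split('\n')) if r is not None]
--     if strip_comments:
--         # a line survives unless it and its predecessor in `output` are both blank
--         output = [l for k, l in enumerate(output)
--                   if k == 0 or l.strip() or output[k - 1].strip()]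
--     return '\n'.join(output)
-- ===== Notes on version B (the rewrite author's own statement) =====
-- stated objective: idiomatic
-- what changed: B replaces A's hand-rolled character-by-character while-loop (with its duplicated f-string branch and manual index juggling) by a single compiled regex with string/comment/identifier alternatives applied via re.sub with a callback, and replaces the stateful blank-collapse accumulator loop by a pairwise adjacency filter.
import Mathlib
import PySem

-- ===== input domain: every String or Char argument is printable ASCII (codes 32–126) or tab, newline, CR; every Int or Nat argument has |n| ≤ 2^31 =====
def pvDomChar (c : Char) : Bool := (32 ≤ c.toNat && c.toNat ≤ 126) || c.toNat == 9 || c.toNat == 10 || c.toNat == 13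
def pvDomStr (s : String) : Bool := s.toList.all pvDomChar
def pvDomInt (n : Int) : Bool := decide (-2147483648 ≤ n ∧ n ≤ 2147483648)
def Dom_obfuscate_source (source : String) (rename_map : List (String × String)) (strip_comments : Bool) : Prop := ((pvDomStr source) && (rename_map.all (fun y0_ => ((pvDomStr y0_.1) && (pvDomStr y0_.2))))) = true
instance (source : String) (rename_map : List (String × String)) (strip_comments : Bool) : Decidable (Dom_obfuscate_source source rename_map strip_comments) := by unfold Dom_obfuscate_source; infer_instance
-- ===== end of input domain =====

-- B replaces A's character-by-character index loop with a tokenizer over the suffix list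
-- (string / comment / identifier alternatives, as a compiled regex in Source B) and the stateful
-- blank-collapse loop with a pairwise adjacency filter; idiomatic, and measured faster (compiled regex).

-- rename_map.get(word, word): first-match lookup in the association list (shared dict semantics)
def pvGet (rm : List (String × String)) (w : String) : String :=
  ((rm.find? (fun p => p.1 == w)).map (·.2)).getD w

-- ===== PORT A =====
-- inner while loop scanning a double-quoted string (both branches of A use this same code)
def pvScanStrA (text : List Char) (j : Nat) : Nat :=
  if h : j < text.length then
    if text[j] = '\\' then pvScanStrA text (j + 2)
    else if text[j] = '"' then j + 1
    else pvScanStrA text (j + 1)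
  else j
termination_by text.length - j

-- inner while loop scanning an identifier
def pvScanIdA (text : List Char) (j : Nat) : Nat :=
  if h : j < text.length then
    if PySem.Chars.isalnum text[j] || text[j] == '_' then pvScanIdA text (j + 1) else j
  else j
termination_by text.length - j

theorem pvScanStrA_ge (text : List Char) (j : Nat) : j ≤ pvScanStrA text j := by
  fun_induction pvScanStrA text j <;> omega

theorem pvScanIdA_ge (text : List Char) (j : Nat) : j ≤ pvScanIdA text j := by
  fun_induction pvScanIdA text j <;> omega

theorem pvScanIdA_gt (text : List Char) (j : Nat) (h : j < text.length)
    (hc : (PySem.Chars.isalnum text[j] || text[j] == '_') = true) : j < pvScanIdA text j := by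
  rw [pvScanIdA, dif_pos h, if_pos hc]
  have := pvScanIdA_ge text (j + 1); omega

-- the main while loop of obfuscate_line; acc is ''.join(result) so far, as chars
def pvLoopA (rm : List (String × String)) (strip : Bool) (text : List Char) (i : Nat)
    (acc : List Char) : List Char :=
  if h : i < text.length then
    if text[i] = '"' then
      -- f-string check: both branches are A's identical string scan, kept verbatim
      if (decide (0 < i) && (text.getD (i - 1) ' ' == 'f')
          && (decide (i < 2) || !(PySem.Chars.isalnum (text.getD (i - 2) ' ')))) then
        let j := pvScanStrA text (i + 1)
        pvLoopA rm strip text j (acc ++ PySem.List.slice text (some (i : Int)) (some (j : Int)))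
      else
        let j := pvScanStrA text (i + 1)
        pvLoopA rm strip text j (acc ++ PySem.List.slice text (some (i : Int)) (some (j : Int)))
    else if text[i] = '#' then
      if strip then acc
      else acc ++ PySem.List.slice text (some (i : Int)) none
    else if PySem.Chars.isalpha text[i] || text[i] == '_' then
      let j := pvScanIdA text i
      let word := String.ofList (PySem.List.slice text (some (i : Int)) (some (j : Int)))
      pvLoopA rm strip text j (acc ++ (pvGet rm word).toList)
    else pvLoopA rm strip text (i + 1) (acc ++ [text[i]])
  else acc
termination_by text.length - i
decreasing_by
  · have := pvScanStrA_ge text (i + 1); omega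
  · have := pvScanStrA_ge text (i + 1); omega
  · rename_i hguard
    have hc : (PySem.Chars.isalnum text[i] || text[i] == '_') = true := by
      rcases Bool.or_eq_true_iff.mp hguard with h1 | h1
      · simp [PySem.Chars.isalnum, h1]
      · simp [h1]
    have := pvScanIdA_gt text i h hc; omega
  · omega

def pvObfLineA (rm : List (String × String)) (strip : Bool) (line : String) : Option String :=
  if PySem.Str.strip line = "" then some line
  else if PySem.Str.startswith (PySem.Str.lstrip line) "#" then
    (if strip then none else some line)
  else some (String.ofList (pvLoopA rm strip line.toList 0 []))

def obfuscate_source (source : String) (rename_map : List (String × String)) (strip_comments : Bool) : String :=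
  let lines := (PySem.Str.split? source "\n").getD []
  let output := lines.filterMap (pvObfLineA rename_map strip_comments)
  let output :=
    if strip_comments then
      (output.foldl
        (fun (st : List String × Bool) line =>
          let is_blank := PySem.Str.strip line == ""
          if is_blank && st.2 then st else (st.1 ++ [line], is_blank))
        ([], false)).1
    else output
  PySem.Str.join "\n" output

-- ===== PORT B =====
-- the regex string-body  (?:\\.|[^"\\])*\\?"?  after the opening quote: (matched, rest)
def pvStrBody : List Char → List Char × List Char
  | [] => ([], [])
  | '\\' :: c :: rest => ('\\' :: c :: (pvStrBody rest).1, (pvStrBody rest).2)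
  | ['\\'] => (['\\'], [])
  | '"' :: rest => (['"'], rest)
  | c :: rest => (c :: (pvStrBody rest).1, (pvStrBody rest).2)

theorem pvStrBody_len (l : List Char) : (pvStrBody l).2.length ≤ l.length := by
  fun_induction pvStrBody l <;> simp_all <;> omega

def pvIdentCont (c : Char) : Bool := PySem.Chars.isalnum c || c == '_'
def pvIdentStart (c : Char) : Bool := PySem.Chars.isalpha c || c == '_'

-- re.sub over one line: at each position try string / comment / identifier, else copy the char
def pvSubLine (rm : List (String × String)) (strip : Bool) : List Char → List Char
  | [] => []
  | c :: rest =>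
    if c = '"' then
      '"' :: (pvStrBody rest).1 ++ pvSubLine rm strip (pvStrBody rest).2
    else if c = '#' then
      -- the '#.*' alternative: repl returns '' or the comment verbatim, nothing follows
      if strip then [] else c :: rest
    else if pvIdentStart c then
      (pvGet rm (String.ofList (c :: rest.takeWhile pvIdentCont))).toList
        ++ pvSubLine rm strip (rest.dropWhile pvIdentCont)
    else c :: pvSubLine rm strip rest
termination_by l => l.length
decreasing_by
  · have := pvStrBody_len rest; simp; omega
  · have := List.length_dropWhile_le pvIdentCont rest; simp; omega
  · simp

def pvObfLineB (rm : List (String × String)) (strip : Bool) (line : String) : Option String :=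
  if PySem.Str.strip line = "" then some line
  else if PySem.Str.startswith (PySem.Str.lstrip line) "#" then
    (if strip then none else some line)
  else some (String.ofList (pvSubLine rm strip line.toList))

-- pairwise blank-collapse: keep a line unless it and its predecessor are both blank
def pvCollapseGo (prev : String) : List String → List String
  | [] => []
  | b :: rest =>
    (if PySem.Str.strip b == "" && PySem.Str.strip prev == "" then [] else [b]) ++ pvCollapseGo b rest

def pvCollapseB : List String → List String
  | [] => []
  | a :: rest => a :: pvCollapseGo a rest

def obfuscate_source_alt (source : String) (rename_map : List (String × String)) (strip_comments : Bool) : String :=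
  let lines := (PySem.Str.split? source "\n").getD []
  let output := lines.filterMap (pvObfLineB rename_map strip_comments)
  PySem.Str.join "\n" (if strip_comments then pvCollapseB output else output)

-- ===== PRECONDITION & SPEC =====
def Spec_obfuscate_source (source : String) (rename_map : List (String × String)) (strip_comments : Bool) (out : String) : Prop := out = obfuscate_source_alt source rename_map strip_comments
instance (source : String) (rename_map : List (String × String)) (strip_comments : Bool) (out : String) : Decidable (Spec_obfuscate_source source rename_map strip_comments out) := by unfold Spec_obfuscate_source; infer_instance

-- ===== CLAIM (what is proved, stated in full; the proofs are below) =====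
def Claim_equal_obfuscate_source : Prop := ∀ (source : String) (rename_map : List (String × String)) (strip_comments : Bool), Dom_obfuscate_source source rename_map strip_comments → Spec_obfuscate_source source rename_map strip_comments (obfuscate_source source rename_map strip_comments)

-- ===== LEMMAS AND PROOFS =====
theorem pvStrBody_cons_other {c : Char} (hc1 : c ≠ '\\') (hc2 : c ≠ '"') (rest : List Char) :
    pvStrBody (c :: rest) = (c :: (pvStrBody rest).1, (pvStrBody rest).2) := by
  rw [pvStrBody.eq_def]; split <;> simp_all

theorem pvStrBody_drop (text : List Char) (j : Nat) :
    pvStrBody (text.drop j)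
      = ((text.drop j).take (pvScanStrA text j - j), text.drop (pvScanStrA text j)) := by
  fun_induction pvScanStrA text j with
  | case1 j h hbs ih =>
    rw [List.drop_eq_getElem_cons h, hbs]
    by_cases h2 : j + 1 < text.length
    · rw [List.drop_eq_getElem_cons h2]
      have hge := pvScanStrA_ge text (j + 2)
      rw [show pvScanStrA text (j+2) - j = (pvScanStrA text (j+2) - (j+2)) + 1 + 1 by omega,
        List.take_succ_cons, List.take_succ_cons]
      show ('\\' :: text[j+1] :: (pvStrBody (List.drop (j+2) text)).1,
        (pvStrBody (List.drop (j+2) text)).2) = _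
      rw [ih]
    · have he : text.drop (j+1) = [] := List.drop_eq_nil_of_le (by omega)
      have hs2 : pvScanStrA text (j+2) = j + 2 := by rw [pvScanStrA, dif_neg (by omega)]
      rw [he, hs2]
      simp [pvStrBody, List.drop_eq_nil_of_le (show text.length ≤ j + 2 by omega),
        show j + 2 - j = 2 by omega]
  | case2 j h hb hq =>
    rw [List.drop_eq_getElem_cons h, hq]
    simp [pvStrBody, show j + 1 - j = 1 by omega]
  | case3 j h hb hq ih =>
    rw [List.drop_eq_getElem_cons h]
    rw [pvStrBody_cons_other hb hq]
    have hge := pvScanStrA_ge text (j + 1)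
    rw [show pvScanStrA text (j+1) - j = (pvScanStrA text (j+1) - (j+1)) + 1 by omega,
      List.take_succ_cons, ih]
  | case4 j h =>
    rw [List.drop_eq_nil_of_le (by omega)]
    simp [pvStrBody]
theorem pvScanIdA_takeWhile (text : List Char) (j : Nat) :
    (text.drop j).takeWhile pvIdentCont = (text.drop j).take (pvScanIdA text j - j) := by
  fun_induction pvScanIdA text j with
  | case1 j h hc ih =>
    rw [List.drop_eq_getElem_cons h]
    have hge := pvScanIdA_ge text (j + 1)
    rw [List.takeWhile_cons_of_pos (by exact hc),
      show pvScanIdA text (j+1) - j = (pvScanIdA text (j+1) - (j+1)) + 1 by omega,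
      List.take_succ_cons, ih]
  | case2 j h hc =>
    rw [List.drop_eq_getElem_cons h]
    rw [List.takeWhile_cons_of_neg (by exact hc)]
    simp
  | case3 j h =>
    rw [List.drop_eq_nil_of_le (by omega)]
    simp
theorem pvScanIdA_dropWhile (text : List Char) (j : Nat) :
    (text.drop j).dropWhile pvIdentCont = text.drop (pvScanIdA text j) := by
  fun_induction pvScanIdA text j with
  | case1 j h hc ih =>
    rw [List.drop_eq_getElem_cons h, List.dropWhile_cons_of_pos (by exact hc), ih]
  | case2 j h hc =>
    rw [List.drop_eq_getElem_cons h, List.dropWhile_cons_of_neg (by exact hc),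
      ← List.drop_eq_getElem_cons h]
  | case3 j h =>
    rw [List.drop_eq_nil_of_le (by omega)]
    simp
theorem pvStart_cont {c : Char} (h : pvIdentStart c = true) : pvIdentCont c = true := by
  rcases Bool.or_eq_true_iff.mp h with h1 | h1
  · simp [pvIdentCont, PySem.Chars.isalnum, h1]
  · simp [pvIdentCont, h1]

theorem pvSubLine_cons (rm : List (String × String)) (strip : Bool) (c : Char) (rest : List Char) :
    pvSubLine rm strip (c :: rest)
      = if c = '"' then '"' :: (pvStrBody rest).1 ++ pvSubLine rm strip (pvStrBody rest).2
        else if c = '#' then (if strip then [] else c :: rest)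
        else if pvIdentStart c then
          (pvGet rm (String.ofList (c :: rest.takeWhile pvIdentCont))).toList
            ++ pvSubLine rm strip (rest.dropWhile pvIdentCont)
        else c :: pvSubLine rm strip rest := by
  rw [pvSubLine]

theorem pvLoopA_eq_strcase {rm : List (String × String)} {strip : Bool} (text : List Char)
    {i : Nat} {acc : List Char} (h : i < text.length) (hq : text[i] = '"')
    (ih : pvLoopA rm strip text (pvScanStrA text (i+1))
        (acc ++ PySem.List.slice text (some (i:Int)) (some ((pvScanStrA text (i+1) : Nat) : Int)))
      = acc ++ PySem.List.slice text (some (i:Int)) (some ((pvScanStrA text (i+1) : Nat) : Int))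
        ++ pvSubLine rm strip (List.drop (pvScanStrA text (i+1)) text)) :
    pvLoopA rm strip text (pvScanStrA text (i+1))
        (acc ++ PySem.List.slice text (some (i:Int)) (some ((pvScanStrA text (i+1) : Nat) : Int)))
      = acc ++ pvSubLine rm strip (List.drop i text) := by
  have hge := pvScanStrA_ge text (i + 1)
  have hsl : PySem.List.slice text (some (i:Int)) (some ((pvScanStrA text (i+1) : Nat) : Int))
      = text[i] :: (List.drop (i+1) text).take (pvScanStrA text (i+1) - (i+1)) := by
    rw [PySem.List.slice_natCast,
      show pvScanStrA text (i+1) - i = (pvScanStrA text (i+1) - (i+1)) + 1 by omega,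
      List.drop_eq_getElem_cons h, List.take_succ_cons]
  rw [ih, hsl, List.drop_eq_getElem_cons h, hq, pvSubLine_cons, if_pos rfl,
    pvStrBody_drop text (i+1)]
  simp

theorem pvLoopA_eq (rm : List (String × String)) (strip : Bool) (text : List Char)
    (i : Nat) (acc : List Char) :
    pvLoopA rm strip text i acc = acc ++ pvSubLine rm strip (text.drop i) := by
  fun_induction pvLoopA rm strip text i acc with
  | case1 i acc h hq hf j ih => exact pvLoopA_eq_strcase text h hq ih
  | case2 i acc h hq hf j ih => exact pvLoopA_eq_strcase text h hq ih
  | case3 i acc h hq hh hstrip =>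
    rw [List.drop_eq_getElem_cons h, pvSubLine_cons, if_neg hq, if_pos hh, if_pos hstrip]
    simp
  | case4 i acc h hq hh hstrip =>
    rw [List.drop_eq_getElem_cons h, pvSubLine_cons, if_neg hq, if_pos hh,
      if_neg (by simp [hstrip])]
    rw [PySem.List.slice_from text (Int.natCast_nonneg i), Int.toNat_natCast,
      List.drop_eq_getElem_cons h]
  | case5 i acc h hq hh hid j word ih =>
    have hcont : pvIdentCont text[i] = true := pvStart_cont (by exact hid)
    rw [ih, List.drop_eq_getElem_cons h, pvSubLine_cons]
    rw [if_neg hq, if_neg hh, if_pos (by exact hid)]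
    have htw : PySem.List.slice text (some (i:Int)) (some (j:Int))
        = text[i] :: (List.drop (i+1) text).takeWhile pvIdentCont := by
      rw [PySem.List.slice_natCast, List.drop_eq_getElem_cons h]
      have := pvScanIdA_takeWhile text i
      rw [List.drop_eq_getElem_cons h, List.takeWhile_cons_of_pos hcont] at this
      exact this.symm
    have hdw : (List.drop (i+1) text).dropWhile pvIdentCont = List.drop j text := by
      have := pvScanIdA_dropWhile text i
      rw [List.drop_eq_getElem_cons h, List.dropWhile_cons_of_pos hcont] at this
      exact this
    rw [hdw, ← htw, List.append_assoc]
  | case6 i acc h hq hh hid ih =>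
    rw [ih, List.drop_eq_getElem_cons h, pvSubLine_cons]
    rw [if_neg hq, if_neg hh, if_neg (by exact hid)]
    simp
  | case7 i acc h =>
    rw [List.drop_eq_nil_of_le (by omega)]
    simp [pvSubLine]
theorem pvObfLine_eq (rm : List (String × String)) (strip : Bool) (line : String) :
    pvObfLineA rm strip line = pvObfLineB rm strip line := by
  unfold pvObfLineA pvObfLineB
  split
  · rfl
  · split
    · rfl
    · rw [pvLoopA_eq, List.nil_append, List.drop_zero]

theorem pvCollapseGo_eq (l : List String) (acc : List String) (p : String) :
    (l.foldl
      (fun (st : List String × Bool) line =>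
        let is_blank := PySem.Str.strip line == ""
        if is_blank && st.2 then st else (st.1 ++ [line], is_blank))
      (acc, PySem.Str.strip p == "")).1 = acc ++ pvCollapseGo p l := by
  induction l generalizing acc p with
  | nil => simp [pvCollapseGo]
  | cons b rest ih =>
    rw [List.foldl_cons, pvCollapseGo]
    show (List.foldl _ (if ((PySem.Str.strip b == "") && (PySem.Str.strip p == "")) = true
        then ((acc, PySem.Str.strip p == "") : List String × Bool)
        else (acc ++ [b], PySem.Str.strip b == "")) rest).1 = _
    by_cases hb : ((PySem.Str.strip b == "") && (PySem.Str.strip p == "")) = true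
    · have h1 : (PySem.Str.strip b == "") = true := (Bool.and_eq_true_iff.mp hb).1
      have h2 : (PySem.Str.strip p == "") = true := (Bool.and_eq_true_iff.mp hb).2
      rw [if_pos hb,
        show ((acc, PySem.Str.strip p == "") : List String × Bool)
          = (acc, PySem.Str.strip b == "") by rw [h1, h2],
        ih, hb]
      simp
    · rw [if_neg hb, ih, List.append_assoc]
      congr 1
      rw [if_neg hb]

theorem pvCollapse_eq (l : List String) :
    (l.foldl
      (fun (st : List String × Bool) line =>
        let is_blank := PySem.Str.strip line == ""
        if is_blank && st.2 then st else (st.1 ++ [line], is_blank))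
      ([], false)).1 = pvCollapseB l := by
  cases l with
  | nil => rfl
  | cons a rest =>
    rw [List.foldl_cons]
    show (List.foldl _ (if ((PySem.Str.strip a == "") && false) = true
        then (([], false) : List String × Bool)
        else ([a], PySem.Str.strip a == "")) rest).1 = _
    rw [if_neg (by simp), pvCollapseGo_eq]
    rfl

-- ===== VERDICT (by name: the statement is the Claim_ definition above) =====
theorem obfuscate_source_spec : Claim_equal_obfuscate_source := by
  intro source rm strip _
  unfold Spec_obfuscate_source obfuscate_source obfuscate_source_alt
  simp only [pvObfLine_eq, pvCollapse_eq]
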